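-- pv_equiv track=rewrite | github.com/shivamkr9/Data_Structure_and_Algorithm_in_Puthon | CountDublicateRepetativeCharactor.py | check
-- ===== SOURCE A (Python) =====
-- def check(strValue):
--     dublicateCount = 0
--     filterDub = []
--     if strValue == "":
--         return dublicateCount
--
--     # Convert string into list
--     for letter in strValue:
--         filterDub.append(letter)
--
--     for checkLetter in range(0, len(filterDub)):
--         isWordFound = 0
--         for x in range(checkLetter + 1, len(filterDub)):
--             if filterDub[checkLetter] == filterDub[x]:
--                 isWordFound += 1
--
--         # check if more then dublicate char is found
--         if isWordFound == 1:
--             dublicateCount += 1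
--
--     return dublicateCount
-- ===== SOURCE B (Python) =====
-- def check(strValue):
--     dublicateCount = 0
--     seen = set()
--     counted = set()
--     for letter in strValue:
--         if letter in seen and letter not in counted:
--             dublicateCount += 1
--             counted.add(letter)
--         else:
--             seen.add(letter)
--     return dublicateCount
-- ===== Notes on version B (the rewrite author's own statement) =====
-- stated objective: faster
-- what changed: Replaced A's nested index loops (for each position, scanning the whole tail to count later occurrences) by a single forward pass maintaining a set of characters already encountered and a set of characters already tallied, incrementing once per character on its second occurrence.
import Mathlib
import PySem

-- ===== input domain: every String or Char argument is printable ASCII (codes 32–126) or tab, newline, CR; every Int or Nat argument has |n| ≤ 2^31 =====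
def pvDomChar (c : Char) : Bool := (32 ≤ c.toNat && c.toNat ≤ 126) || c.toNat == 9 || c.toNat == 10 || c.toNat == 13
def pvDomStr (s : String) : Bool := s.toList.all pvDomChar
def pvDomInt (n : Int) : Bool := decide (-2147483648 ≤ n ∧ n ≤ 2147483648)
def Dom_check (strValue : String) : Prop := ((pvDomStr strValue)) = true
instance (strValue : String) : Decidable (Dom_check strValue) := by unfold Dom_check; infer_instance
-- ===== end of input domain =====

-- B replaces A's nested tail-scans by one forward pass with two sets ('seen'/'counted'); measurably faster on large inputs.

-- ===== PORT A =====
def check (strValue : String) : Int :=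
  if strValue == "" then 0
  else
    let filterDub : List Char := strValue.toList.foldl (fun acc letter => acc ++ [letter]) []
    (PySem.List.pyRange 0 filterDub.length).foldl
      (fun dublicateCount checkLetter =>
        let isWordFound : Int :=
          (PySem.List.pyRange (checkLetter + 1) filterDub.length).foldl
            (fun acc x =>
              if PySem.List.pyGet? filterDub checkLetter == PySem.List.pyGet? filterDub x then
                acc + 1
              else acc) 0
        if isWordFound == 1 then dublicateCount + 1 else dublicateCount) 0

-- ===== PORT B =====
def check_alt (strValue : String) : Int :=
  let final :=
    strValue.toList.foldl
      (fun (st : PySem.Set Char × PySem.Set Char × Int) letter =>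
        if st.1.contains letter && !st.2.1.contains letter then
          (st.1, st.2.1.add letter, st.2.2 + 1)
        else
          (st.1.add letter, st.2.1, st.2.2))
      (PySem.Set.ofList [], PySem.Set.ofList [], 0)
  final.2.2

-- ===== PRECONDITION & SPEC =====
def Spec_check (strValue : String) (out : Int) : Prop := out = check_alt strValue
instance (strValue : String) (out : Int) : Decidable (Spec_check strValue out) := by unfold Spec_check; infer_instance

-- ===== CLAIM (what is proved, stated in full; the proofs are below) =====
def Claim_equal_check : Prop := ∀ (strValue : String), Dom_check strValue → Spec_check strValue (check strValue)

-- ===== LEMMAS AND PROOFS =====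

-- the common quantity: number of positions whose character reappears exactly once later, cons-recursively
def dupF : List Char → Int
  | [] => 0
  | c :: l => (if l.count c = 1 then 1 else 0) + dupF l

theorem count_append_single (p : List Char) (c x : Char) :
    List.count x (p ++ [c]) = List.count x p + (if x = c then 1 else 0) := by
  by_cases h : x = c
  · subst h; simp [List.count_append]
  · simp [List.count_append, List.count_singleton, h]
    exact fun hh => h hh.symm

theorem dupF_snoc (l : List Char) (c : Char) :
    dupF (l ++ [c]) = dupF l + (if l.count c = 1 then 1 else 0) := by
  induction l with
  | nil => simp [dupF]
  | cons a l ih =>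
      simp only [List.cons_append, dupF, ih, count_append_single, List.count_cons]
      by_cases h : a = c
      · subst h
        by_cases h1 : l.count a = 1 <;> by_cases h0 : l.count a = 0 <;> simp_all <;> omega
      · have h' : ¬ c = a := fun hh => h hh.symm
        simp only [beq_iff_eq, h, if_false, add_zero]
        ring

-- counting tail occurrences by index equals List.count on the dropped tail
theorem countP_pyRange (l : List Char) (c : Char) :
    ∀ (k j : Nat), l.length - j = k → j ≤ l.length →
      List.countP (fun x => some c == PySem.List.pyGet? l x)
          (PySem.List.pyRange (j : Int) (l.length : Int))
        = (l.drop j).count c := by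
  intro k
  induction k with
  | zero =>
      intro j hk hj
      have hj' : j = l.length := by omega
      subst hj'
      have hempty : PySem.List.pyRange (l.length : Int) (l.length : Int) = [] := by
        apply List.eq_nil_iff_forall_not_mem.2
        intro x hx
        have := PySem.List.mem_pyRange_one.1 hx
        omega
      simp [hempty]
  | succ k ih =>
      intro j hk hj
      have hjlt : j < l.length := by omega
      have hcons : PySem.List.pyRange (j : Int) (l.length : Int)
          = (j : Int) :: PySem.List.pyRange ((j : Int) + 1) (l.length : Int) := by
        exact PySem.List.pyRange_one_cons (by exact_mod_cast hjlt)
      have hcast : ((j : Int) + 1) = ((j + 1 : Nat) : Int) := by push_cast; ring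
      have hdrop : l.drop j = l[j] :: l.drop (j + 1) := List.drop_eq_getElem_cons hjlt
      rw [hcons, hcast, List.countP_cons, ih (j + 1) (by omega) (by omega), hdrop,
        List.count_cons]
      have hg : PySem.List.pyGet? l (j : Int) = some l[j] := by
        rw [PySem.List.pyGet?_natCast, List.getElem?_eq_getElem hjlt]
      simp only [hg]
      by_cases hc : c = l[j]
      · simp [hc]
      · have hc' : ¬ l[j] = c := fun hh => hc hh.symm
        simp [hc, hc']

-- the outer index loop computes dupF
theorem outer_range_foldl (l : List Char) :
    ∀ (acc : Int),
      (List.range l.length).foldl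
          (fun cnt k => if (l.drop (k + 1)).count (l.getD k 'a') = 1 then cnt + 1 else cnt) acc
        = acc + dupF l := by
  induction l with
  | nil => intro acc; simp [dupF]
  | cons c l ih =>
      intro acc
      rw [List.length_cons, List.range_succ_eq_map, List.foldl_cons, List.foldl_map]
      have hbody :
          (List.range l.length).foldl
              (fun cnt k =>
                if ((c :: l).drop (k + 1 + 1)).count ((c :: l).getD (k + 1) 'a') = 1 then
                  cnt + 1 else cnt)
              (if ((c :: l).drop (0 + 1)).count ((c :: l).getD 0 'a') = 1 then acc + 1 else acc)
            = (List.range l.length).foldl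
              (fun cnt k => if (l.drop (k + 1)).count (l.getD k 'a') = 1 then cnt + 1 else cnt)
              (if l.count c = 1 then acc + 1 else acc) := by
        apply PySem.List.foldl_congr_mem
        intro acc' x _
        simp [List.drop_succ_cons]
      rw [hbody, ih]
      by_cases h : l.count c = 1 <;> simp [dupF, h] <;> ring

-- A's nested loops compute dupF
theorem check_eq_dupF (s : String) : check s = dupF s.toList := by
  by_cases hs : s = ""
  · subst hs; simp [check, dupF]
  · have hsne : (s == "") = false := by simp [hs]
    rw [check]
    simp only [hsne, Bool.false_eq_true, if_false]
    rw [PySem.List.foldl_append_singleton]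
    simp only [List.nil_append]
    set l := s.toList with hl
    rw [PySem.List.pyRange_zero_natCast, List.foldl_map]
    refine Eq.trans
      (PySem.List.foldl_congr_mem (List.range l.length) _
        (fun cnt k => if (l.drop (k + 1)).count (l.getD k 'a') = 1 then cnt + 1 else cnt)
        0 ?_) ?_
    · intro acc k hk
      have hklt : k < l.length := List.mem_range.1 hk
      have hget : PySem.List.pyGet? l (k : Int) = some (l.getD k 'a') := by
        rw [PySem.List.pyGet?_natCast, List.getElem?_eq_getElem hklt]
        simp [List.getD_eq_getElem?_getD, List.getElem?_eq_getElem hklt]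
      simp only [hget]
      rw [PySem.List.foldl_count_if (fun x => some (l.getD k 'a') == PySem.List.pyGet? l x)]
      have hcast : ((k : Int) + 1) = ((k + 1 : Nat) : Int) := by push_cast; ring
      rw [hcast, countP_pyRange l (l.getD k 'a') (l.length - (k + 1)) (k + 1) rfl (by omega)]
      simp only [zero_add]
      by_cases h : (l.drop (k + 1)).count (l.getD k 'a') = 1
      · simp
      · have h' : ((l.drop (k + 1)).count (l.getD k 'a') : Int) ≠ 1 := by exact_mod_cast h
        simp [h']
    · rw [outer_range_foldl]
      ring

-- B's single pass computes dupF (loop invariant over the processed prefix)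
theorem foldB_invariant (l : List Char) :
    ∀ (p : List Char) (seen counted : PySem.Set Char) (cnt : Int),
      (∀ x, x ∈ seen ↔ x ∈ p) → (∀ x, x ∈ counted ↔ 2 ≤ p.count x) → cnt = dupF p →
      (l.foldl
          (fun (st : PySem.Set Char × PySem.Set Char × Int) letter =>
            if st.1.contains letter && !st.2.1.contains letter then
              (st.1, st.2.1.add letter, st.2.2 + 1)
            else
              (st.1.add letter, st.2.1, st.2.2))
          (seen, counted, cnt)).2.2 = dupF (p ++ l) := by
  induction l with
  | nil => intro p seen counted cnt _ _ hcnt; simpa using hcnt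
  | cons ch l ih =>
      intro p seen counted cnt hseen hcounted hcnt
      rw [List.foldl_cons]
      have happ : p ++ ch :: l = (p ++ [ch]) ++ l := by simp
      rw [happ]
      by_cases h1 : ch ∈ p
      · by_cases h2 : 2 ≤ p.count ch
        · -- already counted: else branch, state unchanged logically
          have hc1 : seen.contains ch = true := by
            simpa [List.contains_iff_mem] using (hseen ch).2 h1
          have hc2 : counted.contains ch = true := by
            simpa [List.contains_iff_mem] using (hcounted ch).2 h2
          simp only [hc1, hc2, Bool.not_true, Bool.and_false, Bool.false_eq_true, if_false]
          apply ih
          · intro x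
            rw [PySem.Set.mem_add, hseen x, List.mem_append, List.mem_singleton]
          · intro x
            rw [hcounted x, count_append_single]
            by_cases hxc : x = ch
            · subst hxc
              rw [if_pos rfl]
              omega
            · rw [if_neg hxc, add_zero]
          · rw [hcnt, dupF_snoc]
            have hne : p.count ch ≠ 1 := by omega
            simp [hne]
        · -- second occurrence: then branch, increment
          have hcount1 : p.count ch = 1 := by
            have := List.count_pos_iff.2 h1
            omega
          have hc1 : seen.contains ch = true := by
            simpa [List.contains_iff_mem] using (hseen ch).2 h1
          have hc2 : counted.contains ch = false := by
            have hnm : ¬ ch ∈ counted := fun h => h2 ((hcounted ch).1 h)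
            simpa [List.contains_iff_mem] using hnm
          simp only [hc1, hc2, Bool.not_false, Bool.and_true, if_true]
          apply ih
          · intro x
            rw [hseen x, List.mem_append, List.mem_singleton]
            constructor
            · intro h; exact Or.inl h
            · intro h; rcases h with h | h
              · exact h
              · subst h; exact h1
          · intro x
            rw [PySem.Set.mem_add, hcounted x, count_append_single]
            by_cases hxc : x = ch
            · subst hxc; simp; omega
            · simp [hxc]
          · rw [hcnt, dupF_snoc, hcount1]
            simp
      · -- first occurrence: else branch, add to seen
        have hc1 : seen.contains ch = false := by
          have hnm : ¬ ch ∈ seen := fun h => h1 ((hseen ch).1 h)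
          simpa [List.contains_iff_mem] using hnm
        simp only [hc1, Bool.false_and, Bool.false_eq_true, if_false]
        have hzero : p.count ch = 0 := List.count_eq_zero.2 h1
        apply ih
        · intro x
          rw [PySem.Set.mem_add, hseen x, List.mem_append, List.mem_singleton]
        · intro x
          rw [hcounted x, count_append_single]
          by_cases hxc : x = ch
          · subst hxc; simp [hzero]
          · simp [hxc]
        · rw [hcnt, dupF_snoc, hzero]
          simp

theorem check_alt_eq_dupF (s : String) : check_alt s = dupF s.toList := by
  rw [check_alt]
  have h := foldB_invariant s.toList [] (PySem.Set.ofList []) (PySem.Set.ofList []) 0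
    (by intro x; simp [PySem.Set.ofList]) (by intro x; simp [PySem.Set.ofList])
    (by simp [dupF])
  simpa using h

-- ===== VERDICT (by name: the statement is the Claim_ definition above) =====
theorem check_spec : Claim_equal_check := by
  intro s _
  unfold Spec_check
  rw [check_eq_dupF, check_alt_eq_dupF]
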